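-- pv_equiv track=rewrite | github.com/iproha94/contests | codeforces/1220/c.py | f
-- ===== SOURCE A (Python) =====
-- def f(s):
--     result = [''] * len(s)
--     min_char = s[0]
--     result[0] = 'Mike'
--     for i in range(1, len(s)):
--         if min_char < s[i]:
--             result[i] = 'Ann'
--         else:
--             result[i] = 'Mike'
--             min_char = s[i]
--
--     return ''.join(e + '\n' for e in result)
-- ===== SOURCE B (Python) =====
-- def f(s):
--     # Two-pass: precompute running prefix minima, then label by comparing
--     # each char with the minimum of the strictly earlier prefix.
--     pm = s[0]          # raises IndexError on empty input, like A
--     pms = []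
--     for c in s:
--         pm = min(pm, c)
--         pms.append(pm)
--     return 'Mike\n' + ''.join(
--         'Mike\n' if c <= p else 'Ann\n' for c, p in zip(s[1:], pms))
-- ===== Notes on version B (the rewrite author's own statement) =====
-- stated objective: idiomatic
-- what changed: B replaces A's preallocated result array mutated inside one stateful loop by a two-pass decomposition: it first builds the prefix-minimum table, then labels each character by comparing it with the minimum of the strictly earlier prefix via zip, building the output string directly.
import Mathlib
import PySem

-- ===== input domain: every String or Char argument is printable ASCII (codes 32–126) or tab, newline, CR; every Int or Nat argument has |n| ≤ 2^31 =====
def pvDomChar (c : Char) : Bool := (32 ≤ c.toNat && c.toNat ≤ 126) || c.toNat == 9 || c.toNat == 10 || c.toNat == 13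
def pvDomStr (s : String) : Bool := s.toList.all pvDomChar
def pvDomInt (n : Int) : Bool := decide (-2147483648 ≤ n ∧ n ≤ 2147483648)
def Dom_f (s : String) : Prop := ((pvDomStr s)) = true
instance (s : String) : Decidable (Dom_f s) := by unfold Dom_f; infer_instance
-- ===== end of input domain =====

-- B labels each position from a precomputed prefix-minimum table instead of A's
-- single stateful loop writing into a preallocated array (objective: idiomatic).

-- ===== PORT A =====
def f (s : String) : String :=
  match s.toList with
  | [] => ""        -- Python: s[0] raises IndexError here; excluded by Pre_f
  | c0 :: rest =>
    let cs := c0 :: rest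
    let result := (List.replicate cs.length "").set 0 "Mike"
    let fin := (PySem.List.pyRange 1 (cs.length : Int) 1).foldl
      (fun (st : List String × Char) (i : Int) =>
        -- s[i] with 1 ≤ i < len s, so exact as cs.getD i.toNat
        let ci := cs.getD i.toNat ' '
        if st.2 < ci then (st.1.set i.toNat "Ann", st.2)
        else (st.1.set i.toNat "Mike", ci))
      (result, c0)
    String.join (fin.1.map (fun e => e ++ "\n"))

-- ===== PORT B =====
def f_alt (s : String) : String :=
  match s.toList with
  | [] => ""        -- Python: s[0] raises IndexError here; excluded by Pre_f
  | c0 :: rest =>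
    let cs := c0 :: rest
    let pms := (cs.foldl (fun (acc : Char × List Char) c =>
        let pm := min acc.1 c
        (pm, acc.2 ++ [pm])) (c0, [])).2
    "Mike\n" ++ String.join (((cs.drop 1).zip pms).map
      (fun cp => if cp.1 ≤ cp.2 then "Mike\n" else "Ann\n"))

-- ===== PRECONDITION & SPEC =====
-- Pre_f excludes only the empty string, on which A raises IndexError (s[0]).
def Pre_f (s : String) : Prop := s ≠ ""
instance (s : String) : Decidable (Pre_f s) := by unfold Pre_f; infer_instance
def pvWitness_f : String := "ab"
def Spec_f (s : String) (out : String) : Prop := out = f_alt s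
instance (s : String) (out : String) : Decidable (Spec_f s out) := by unfold Spec_f; infer_instance

-- ===== CLAIM (what is proved, stated in full; the proofs are below) =====
def Claim_equal_f : Prop := ∀ (s : String), Dom_f s → Pre_f s → Spec_f s (f s)

-- ===== LEMMAS AND PROOFS =====

-- labels produced position by position, with the running minimum as parameter
def pvLabels (m : Char) : List Char → List String
  | [] => []
  | c :: t => if m < c then "Ann" :: pvLabels m t else "Mike" :: pvLabels c t

-- running prefix minima
def pvMins (m : Char) : List Char → List Char
  | [] => []
  | c :: t => min m c :: pvMins (min m c) t

lemma pvFoldA (cs : List Char) (t : List Char) :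
    ∀ (pre : List String) (m : Char), cs.drop pre.length = t →
    ((PySem.List.pyRange (pre.length : Int) ((pre.length + t.length : Nat) : Int) 1).foldl
      (fun (st : List String × Char) (i : Int) =>
        let ci := cs.getD i.toNat ' '
        if st.2 < ci then (st.1.set i.toNat "Ann", st.2)
        else (st.1.set i.toNat "Mike", ci))
      (pre ++ List.replicate t.length "", m)).1 = pre ++ pvLabels m t := by
  induction t with
  | nil =>
    intro pre m _
    simp [pvLabels]
  | cons c t' ih =>
    intro pre m hdrop
    have hlen := congrArg List.length hdrop
    simp [List.length_drop] at hlen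
    have hlt : pre.length < cs.length := by omega
    have hget : cs.getD pre.length ' ' = c := by
      have h0 : cs[pre.length]? = some c := by
        have h1 : (cs.drop pre.length)[0]? = cs[pre.length + 0]? :=
          List.getElem?_drop
        rw [hdrop] at h1
        simpa using h1.symm
      simp [List.getD_eq_getElem?_getD, h0]
    have hdrop' : cs.drop (pre.length + 1) = t' := by
      have : cs.drop (pre.length + 1) = (cs.drop pre.length).drop 1 := by
        rw [List.drop_drop]
      rw [this, hdrop]; rfl
    have hab : (pre.length : Int) < ((pre.length + (c :: t').length : Nat) : Int) := by
      simp
    rw [PySem.List.pyRange_one_cons hab]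
    rw [List.foldl_cons]
    have hset : ∀ x : String,
        (pre ++ List.replicate (c :: t').length "").set pre.length x
          = (pre ++ [x]) ++ List.replicate t'.length "" := by
      intro x
      simp [List.replicate_succ, List.append_assoc]
    by_cases hmc : m < c
    · have step1 : pvLabels m (c :: t') = "Ann" :: pvLabels m t' := by
        simp [pvLabels, hmc]
      have := ih (pre ++ ["Ann"]) m (by simpa using hdrop')
      simp only [Int.toNat_natCast, hget, hmc, if_true, hset]
      rw [show ((pre.length : Int) + 1) = (((pre ++ ["Ann"]).length : Nat) : Int) by
        simp]
      rw [show ((pre.length + (c :: t').length : Nat) : Int)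
            = (((pre ++ ["Ann"]).length + t'.length : Nat) : Int) by push_cast [List.length_append, List.length_cons, List.length_nil]; ring]
      simpa [step1, List.append_assoc] using this
    · have step1 : pvLabels m (c :: t') = "Mike" :: pvLabels c t' := by
        simp [pvLabels, hmc]
      have := ih (pre ++ ["Mike"]) c (by simpa using hdrop')
      simp only [Int.toNat_natCast, hget, hmc, if_false, hset]
      rw [show ((pre.length : Int) + 1) = (((pre ++ ["Mike"]).length : Nat) : Int) by
        simp]
      rw [show ((pre.length + (c :: t').length : Nat) : Int)
            = (((pre ++ ["Mike"]).length + t'.length : Nat) : Int) by push_cast [List.length_append, List.length_cons, List.length_nil]; ring]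
      simpa [step1, List.append_assoc] using this

lemma pvFoldB (t : List Char) :
    ∀ (m : Char) (acc : List Char),
    (t.foldl (fun (a : Char × List Char) c =>
        let pm := min a.1 c
        (pm, a.2 ++ [pm])) (m, acc)).2 = acc ++ pvMins m t := by
  induction t with
  | nil => intro m acc; simp [pvMins]
  | cons c t' ih => intro m acc; simp [List.foldl, pvMins, ih, List.append_assoc]

lemma pvZipMap (t : List Char) :
    ∀ (m : Char),
    ((t.zip (m :: pvMins m t)).map
      (fun cp : Char × Char => if cp.1 ≤ cp.2 then "Mike\n" else "Ann\n"))
      = (pvLabels m t).map (fun e => e ++ "\n") := by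
  induction t with
  | nil => intro m; simp [pvLabels]
  | cons c t' ih =>
    intro m
    by_cases h : m < c
    · have h1 : ¬ c ≤ m := not_le.mpr h
      have h2 : min m c = m := min_eq_left (le_of_lt h)
      simp [pvMins, pvLabels, h, h1, h2, ih]
    · have h1 : c ≤ m := le_of_not_gt h
      have h2 : min m c = c := min_eq_right h1
      simp [pvMins, pvLabels, h, h1, ih]

lemma pvFoldlAppend (l : List String) :
    ∀ (a : String), l.foldl (fun r s => r ++ s) a = a ++ l.foldl (fun r s => r ++ s) "" := by
  induction l with
  | nil => intro a; simp
  | cons b l ih =>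
    intro a
    simp only [List.foldl_cons]
    rw [ih (a ++ b), ih ("" ++ b)]
    simp [String.append_assoc]

lemma pvJoinCons (a : String) (l : List String) :
    String.join (a :: l) = a ++ String.join l := by
  simp only [String.join, List.foldl_cons]
  rw [pvFoldlAppend]
  simp

-- ===== VERDICT (by name: the statement is the Claim_ definition above) =====
theorem f_spec : Claim_equal_f := by
  intro s _ _
  unfold Spec_f f f_alt
  cases hcs : s.toList with
  | nil => simp
  | cons c0 rest =>
    simp only []
    have hA := pvFoldA (c0 :: rest) rest ["Mike"] c0 (by rfl)
    have hB := pvFoldB (c0 :: rest) c0 []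
    have hZ := pvZipMap rest c0
    have hB' : (List.foldl (fun (a : Char × List Char) c => (min a.1 c, a.2 ++ [min a.1 c]))
        (c0, []) (c0 :: rest)).2 = c0 :: pvMins c0 rest := by
      rw [hB]; simp [pvMins]
    rw [show ((["Mike"].length + rest.length : Nat) : Int) = ((c0 :: rest).length : Int) by
      push_cast [List.length_cons, List.length_nil]; ring] at hA
    have hA' : (List.foldl
        (fun (st : List String × Char) (i : Int) =>
          if st.2 < (c0 :: rest).getD i.toNat ' ' then (st.1.set i.toNat "Ann", st.2)
          else (st.1.set i.toNat "Mike", (c0 :: rest).getD i.toNat ' '))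
        ((List.replicate (c0 :: rest).length "").set 0 "Mike", c0)
        (PySem.List.pyRange 1 ((c0 :: rest).length : Int) 1)).1
        = "Mike" :: pvLabels c0 rest := hA
    rw [hA', hB']
    simp only [List.drop_one, List.tail_cons]
    rw [hZ, List.map_cons, pvJoinCons]
    rfl
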